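-- pv_equiv track=rewrite | github.com/IDIAS-Tufts/IDIAS | final.py | remove_braces
-- ===== SOURCE A (Python) =====
-- def remove_braces(inStr):
--     current = 0
--     brace_open = False
--
--     final_string = ""
--
--     for s in inStr:
--         if s == "<":
--             brace_open = True
--
--         if not brace_open:
--             final_string += s
--
--         if s == ">":
--             brace_open = False
--
--     return final_string
-- ===== SOURCE B (Python) =====
-- def remove_braces(inStr):
--     parts = []
--     i = 0
--     while True:
--         j = inStr.find("<", i)
--         if j == -1:
--             parts.append(inStr[i:])
--             break
--         parts.append(inStr[i:j])
--         k = inStr.find(">", j)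
--         if k == -1:
--             break
--         i = k + 1
--     return "".join(parts)
-- ===== Notes on version B (the rewrite author's own statement) =====
-- stated objective: faster
-- what changed: Replaces the per-character boolean-state loop (with O(n^2) string += accumulation) by a chunked str.find scan that appends whole slices between brackets and joins once.
import Mathlib
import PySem

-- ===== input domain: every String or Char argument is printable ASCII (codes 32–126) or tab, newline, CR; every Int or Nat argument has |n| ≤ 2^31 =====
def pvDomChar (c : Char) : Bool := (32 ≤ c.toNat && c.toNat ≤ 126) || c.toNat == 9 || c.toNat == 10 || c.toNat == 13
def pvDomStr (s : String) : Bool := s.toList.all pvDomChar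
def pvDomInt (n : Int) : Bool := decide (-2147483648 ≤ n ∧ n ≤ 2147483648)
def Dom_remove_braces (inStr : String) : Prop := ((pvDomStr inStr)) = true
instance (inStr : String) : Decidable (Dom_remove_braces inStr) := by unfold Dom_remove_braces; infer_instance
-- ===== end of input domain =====

-- B replaces A's per-character boolean-state loop by a chunked find/slice scan (takeWhile/dropWhile
-- chunks in the port), joining slices between brackets; objective: faster (no per-char accumulation).


-- ===== PORT A =====
-- A's for-loop over the characters with state (brace_open, final_string); the accumulated
-- string is kept as a List Char and packed with String.ofList at the end.
def remove_braces (inStr : String) : String :=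
  let r := inStr.toList.foldl
    (fun (st : Bool × List Char) s =>
      let braceOpen := if s = '<' then true else st.1
      let acc := if braceOpen = false then st.2 ++ [s] else st.2
      let braceOpen' := if s = '>' then false else braceOpen
      (braceOpen', acc))
    (false, [])
  String.ofList r.2

-- ===== PORT B =====
-- Source B's while-loop: find the next '<' (find + slice = the takeWhile/dropWhile chunk), keep the
-- slice before it, then find the next '>' and resume after it; no '<' left ⇒ keep the rest,
-- no '>' ⇒ stop.
def rbAltGo (l : List Char) : List Char :=
  match h1 : l.dropWhile (fun c => c != '<') with
  | [] => l
  | _ :: r =>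
    l.takeWhile (fun c => c != '<') ++
    (match h2 : r.dropWhile (fun c => c != '>') with
     | [] => []
     | _ :: r2 => rbAltGo r2)
termination_by l.length
decreasing_by
  have hr : r.length < l.length := by
    have := List.Sublist.length_le (List.dropWhile_sublist (l := l) (p := fun c => c != '<'))
    rw [h1] at this; simpa using Nat.lt_of_lt_of_le (Nat.lt_succ_self _) this
  have hr2 : r2.length < r.length := by
    have := List.Sublist.length_le (List.dropWhile_sublist (l := r) (p := fun c => c != '>'))
    rw [h2] at this; simpa using Nat.lt_of_lt_of_le (Nat.lt_succ_self _) this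
  exact Nat.lt_trans hr2 hr

def remove_braces_alt (inStr : String) : String := String.ofList (rbAltGo inStr.toList)

-- ===== PRECONDITION & SPEC =====
def Spec_remove_braces (inStr : String) (out : String) : Prop := out = remove_braces_alt inStr
instance (inStr : String) (out : String) : Decidable (Spec_remove_braces inStr out) := by unfold Spec_remove_braces; infer_instance

-- ===== CLAIM (what is proved, stated in full; the proofs are below) =====
def Claim_equal_remove_braces : Prop := ∀ (inStr : String), Dom_remove_braces inStr → Spec_remove_braces inStr (remove_braces inStr)

-- ===== LEMMAS AND PROOFS =====

-- proof-side recursive reading of A's fold, parametrised by the brace_open flag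
def gA : Bool → List Char → List Char
  | _, [] => []
  | b, c :: r =>
    let b1 := if c = '<' then true else b
    (if b1 = false then [c] else []) ++ gA (if c = '>' then false else b1) r

-- proof-side reading of B's inner "find '>' and resume" step
def rbSkip (l : List Char) : List Char :=
  match l.dropWhile (fun c => c != '>') with
  | [] => []
  | _ :: r2 => rbAltGo r2

theorem foldl_gA (l : List Char) : ∀ (b : Bool) (acc : List Char),
    (l.foldl (fun (st : Bool × List Char) s =>
      let braceOpen := if s = '<' then true else st.1
      let acc := if braceOpen = false then st.2 ++ [s] else st.2
      let braceOpen' := if s = '>' then false else braceOpen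
      (braceOpen', acc)) (b, acc)).2 = acc ++ gA b l := by
  induction l with
  | nil => intro b acc; simp [gA]
  | cons c r ih =>
    intro b acc
    simp only [List.foldl_cons, gA, ih]
    split_ifs <;> simp

theorem dw_cons_ne (c : Char) (r : List Char) (d : Char) (hc : c ≠ d) :
    (c :: r).dropWhile (fun x => x != d) = r.dropWhile (fun x => x != d) := by
  simp [List.dropWhile_cons, hc]

theorem rbAltGo_cons_ne {c : Char} (r : List Char) (hc : c ≠ '<') :
    rbAltGo (c :: r) = c :: rbAltGo r := by
  rw [rbAltGo]
  split
  · rename_i h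
    rw [dw_cons_ne c r '<' hc] at h
    rw [rbAltGo]
    split
    · simp
    · rename_i x xs h2
      rw [h] at h2; exact absurd h2 (by simp)
  · rename_i x xs h
    rw [dw_cons_ne c r '<' hc] at h
    simp only [List.takeWhile_cons, hc, bne_iff_ne, ne_eq, not_false_iff, decide_true, if_true]
    conv_rhs => rw [rbAltGo]
    rw [h]
    simp

theorem rbAltGo_cons_lt (r : List Char) : rbAltGo ('<' :: r) = rbSkip r := by
  rw [rbAltGo, rbSkip]
  have h0 : ('<' :: r).dropWhile (fun x => x != '<') = '<' :: r := by
    simp [List.dropWhile_cons]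
  split
  · rename_i h; rw [h0] at h; exact absurd h (by simp)
  · rename_i x xs h
    rw [h0] at h
    cases h
    simp only [List.takeWhile_cons]
    norm_num
    split <;> (rename_i h2; rw [h2])

theorem gA_eq_alt : ∀ (n : Nat) (l : List Char), l.length ≤ n →
    gA false l = rbAltGo l ∧ gA true l = rbSkip l := by
  intro n
  induction n with
  | zero =>
    intro l hl
    have : l = [] := List.eq_nil_of_length_eq_zero (Nat.le_zero.mp hl)
    subst this
    exact ⟨by rw [rbAltGo]; simp [gA], by rw [rbSkip]; simp [gA]⟩
  | succ n ih =>
    intro l hl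
    cases l with
    | nil => exact ⟨by rw [rbAltGo]; simp [gA], by rw [rbSkip]; simp [gA]⟩
    | cons c r =>
      have hr : r.length ≤ n := Nat.lt_succ_iff.mp (by simpa using hl)
      constructor
      · by_cases hc : c = '<'
        · subst hc
          rw [rbAltGo_cons_lt]
          simp only [gA]
          have : ('<' : Char) ≠ '>' := by decide
          simp only [this, if_true, if_false]
          simpa using (ih r hr).2
        · rw [rbAltGo_cons_ne r hc]
          simp only [gA, if_neg hc]
          by_cases hg : c = '>'
          · subst hg
            simpa using (ih r hr).1
          · simp only [if_neg hg]
            simpa using (ih r hr).1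
      · by_cases hg : c = '>'
        · subst hg
          have h0 : ('>' :: r).dropWhile (fun x => x != '>') = '>' :: r := by
            simp [List.dropWhile_cons]
          rw [rbSkip, h0]
          simp only [gA]
          have : ('>' : Char) ≠ '<' := by decide
          simp only [this, if_false, if_true]
          simpa using (ih r hr).1
        · rw [rbSkip, dw_cons_ne c r '>' hg]
          have h2 : gA true (c :: r) = gA true r := by
            simp [gA, hg]
          rw [h2, (ih r hr).2, rbSkip]

-- ===== VERDICT (by name: the statement is the Claim_ definition above) =====
theorem remove_braces_spec : Claim_equal_remove_braces := by
  intro inStr _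
  unfold Spec_remove_braces remove_braces remove_braces_alt
  have h := foldl_gA inStr.toList false []
  simp only [h, List.nil_append]
  rw [(gA_eq_alt inStr.toList.length inStr.toList (le_refl _)).1]
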